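-- pv_equiv track=rewrite | github.com/vulpicastor/advent-of-code-2023 | src/02.py | fewest_bag
-- ===== SOURCE A (Python) =====
-- def fewest_bag(trial_list):
--     bag = {}
--     for t in trial_list:
--         for color, n in t.items():
--             if color not in bag:
--                 bag[color] = n
--             else:
--                 if n > bag[color]:
--                     bag[color] = n
--     return bag
-- ===== SOURCE B (Python) =====
-- def fewest_bag(trial_list):
--     # Collect every observed count per color, then reduce each group with max.
--     groups = {}
--     for t in trial_list:
--         for color, n in t.items():
--             groups.setdefault(color, []).append(n)
--     return {color: max(vals) for color, vals in groups.items()}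
-- ===== Notes on version B (the rewrite author's own statement) =====
-- stated objective: alternative
-- what changed: B replaces A's streaming running-max dict with a two-phase collect-then-reduce: it first groups every observed count into a per-color list, then produces the result as a dict comprehension taking max of each group.
import Mathlib
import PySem

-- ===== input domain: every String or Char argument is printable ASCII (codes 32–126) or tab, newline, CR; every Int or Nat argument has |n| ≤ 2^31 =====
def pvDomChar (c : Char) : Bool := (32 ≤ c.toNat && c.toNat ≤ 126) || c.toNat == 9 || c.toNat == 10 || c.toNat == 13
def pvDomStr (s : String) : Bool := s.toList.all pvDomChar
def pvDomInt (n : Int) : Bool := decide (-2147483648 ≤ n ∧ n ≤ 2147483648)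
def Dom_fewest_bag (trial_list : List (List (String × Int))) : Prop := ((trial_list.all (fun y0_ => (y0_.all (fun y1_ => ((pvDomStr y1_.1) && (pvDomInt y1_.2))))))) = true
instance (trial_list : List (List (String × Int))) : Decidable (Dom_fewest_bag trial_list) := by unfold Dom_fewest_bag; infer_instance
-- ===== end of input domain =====

-- B replaces A's streaming running-max with collect-all-counts-per-color, then max of each group (alternative decomposition, same cost).

-- ===== PORT A =====
-- A: one dict of running maxima, updated in a single streaming pass.
def fewest_bag (trial_list : List (List (String × Int))) : List (String × Int) :=
  (trial_list.foldl
    (fun bag t =>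
      t.foldl
        (fun bag p =>
          if bag.contains p.1 = false then bag.insert p.1 p.2
          else if bag.getD p.1 0 < p.2 then bag.insert p.1 p.2
          else bag)
        bag)
    PySem.Dict.empty).items

-- ===== PORT B =====
-- B: groups.setdefault(color, []).append(n) is Dict.modify p.1 [] (· ++ [p.2]);
-- max(vals) is PySem.List.max? with identity key (vals is nonempty by construction, so .getD 0 is never used).
def fewest_bag_alt (trial_list : List (List (String × Int))) : List (String × Int) :=
  let groups : PySem.Dict String (List Int) :=
    trial_list.foldl
      (fun g t => t.foldl (fun g p => g.modify p.1 [] (fun vs => vs ++ [p.2])) g)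
      PySem.Dict.empty
  groups.items.map (fun q => (q.1, (PySem.List.max? q.2 id).getD 0))

-- ===== PRECONDITION & SPEC =====
def Spec_fewest_bag (trial_list : List (List (String × Int))) (out : List (String × Int)) : Prop := out = fewest_bag_alt trial_list
instance (trial_list : List (List (String × Int))) (out : List (String × Int)) : Decidable (Spec_fewest_bag trial_list out) := by unfold Spec_fewest_bag; infer_instance

-- ===== CLAIM (what is proved, stated in full; the proofs are below) =====
def Claim_equal_fewest_bag : Prop := ∀ (trial_list : List (List (String × Int))), Dom_fewest_bag trial_list → Spec_fewest_bag trial_list (fewest_bag trial_list)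

-- ===== LEMMAS AND PROOFS =====

-- the running-max step on optional values (A's update, and also max?'s fold step with key id)
def pvMStep (o : Option Int) (v : Int) : Option Int :=
  match o with
  | none => some v
  | some m => if m < v then some v else some m

-- A's per-pair step, named for the lemmas (definitionally the lambda in the port)
def pvAStep (bag : PySem.Dict String Int) (p : String × Int) : PySem.Dict String Int :=
  if bag.contains p.1 = false then bag.insert p.1 p.2
  else if bag.getD p.1 0 < p.2 then bag.insert p.1 p.2
  else bag

lemma pvAStep_get? (bag : PySem.Dict String Int) (p : String × Int) (c : String) :
    (pvAStep bag p).get? c = if p.1 = c then pvMStep (bag.get? c) p.2 else bag.get? c := by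
  unfold pvAStep pvMStep
  by_cases hc : p.1 = c
  · subst hc
    rcases h : bag.get? p.1 with _ | m
    · have hcon : bag.contains p.1 = false := by
        rw [PySem.Dict.contains_eq_isSome_get?, h]; rfl
      simp [hcon, PySem.Dict.get?_insert_self]
    · have hcon : bag.contains p.1 = true := by
        rw [PySem.Dict.contains_eq_isSome_get?, h]; rfl
      have hgd : bag.getD p.1 0 = m := PySem.Dict.getD_of_get?_eq_some bag 0 h
      simp [hcon, hgd]
      split_ifs with hlt
      · simp [PySem.Dict.get?_insert_self]
      · exact h
  · have hne : c ≠ p.1 := fun h => hc h.symm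
    simp [hc]
    split_ifs <;> simp [PySem.Dict.get?_insert_of_ne _ _ hne]

lemma pvAStep_keys (bag : PySem.Dict String Int) (p : String × Int) :
    (pvAStep bag p).keys = PySem.Set.add bag.keys p.1 := by
  unfold pvAStep
  by_cases hcon : bag.contains p.1 = true
  · have hmem : p.1 ∈ bag.keys := (PySem.Dict.contains_iff_mem_keys bag p.1).1 hcon
    simp [hcon]
    split_ifs
    · rw [PySem.Dict.keys_insert_of_contains bag p.2 hcon, PySem.Set.add_of_mem hmem]
    · rw [PySem.Set.add_of_mem hmem]
  · have hcon' : bag.contains p.1 = false := by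
      cases h : bag.contains p.1
      · rfl
      · exact absurd h hcon
    have hmem : p.1 ∉ bag.keys := fun hm =>
      hcon ((PySem.Dict.contains_iff_mem_keys bag p.1).2 hm)
    simp [hcon']
    rw [PySem.Dict.keys_insert_of_not_contains bag p.2 hcon', PySem.Set.add_of_not_mem hmem]

lemma pvFoldA_get? (ps : List (String × Int)) (d : PySem.Dict String Int) (c : String) :
    (ps.foldl pvAStep d).get? c
      = ((ps.filter (fun p => p.1 == c)).map (fun p => p.2)).foldl pvMStep (d.get? c) := by
  induction ps generalizing d with
  | nil => rfl
  | cons p ps ih =>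
    simp only [List.foldl_cons, List.filter_cons]
    by_cases hc : p.1 = c
    · have hb : (p.1 == c) = true := beq_iff_eq.2 hc
      simp [ih, pvAStep_get?, hc]
    · have hb : (p.1 == c) = false := beq_eq_false_iff_ne.2 hc
      simp [hb, ih, pvAStep_get?, hc]

lemma pvFoldA_keys (ps : List (String × Int)) (d : PySem.Dict String Int) :
    (ps.foldl pvAStep d).keys = PySem.Set.update d.keys (ps.map (fun p => p.1)) := by
  induction ps generalizing d with
  | nil => rfl
  | cons p ps ih =>
    simp only [List.foldl_cons, List.map_cons, PySem.Set.update_cons, ih]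
    congr 1
    exact pvAStep_keys d p

-- max? with identity key is exactly the pvMStep fold
lemma pvMax?_eq_foldl (vs : List Int) :
    PySem.List.max? vs id = vs.foldl pvMStep none := by
  unfold PySem.List.max?
  congr 1
  funext o v
  cases o with
  | none => rfl
  | some m => simp [pvMStep]

-- ===== VERDICT (by name: the statement is the Claim_ definition above) =====
-- the two ports, re-expressed as folds over the flattened pair list
lemma pvA_flat (tl : List (List (String × Int))) :
    fewest_bag tl = (tl.flatten.foldl pvAStep PySem.Dict.empty).items := by
  unfold fewest_bag
  rw [List.foldl_flatten]
  rfl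

lemma pvB_flat (tl : List (List (String × Int))) :
    fewest_bag_alt tl =
      ((tl.flatten.foldl (fun g p => g.modify p.1 [] (fun vs => vs ++ [p.2]))
          PySem.Dict.empty).items).map (fun q => (q.1, (PySem.List.max? q.2 id).getD 0)) := by
  unfold fewest_bag_alt
  rw [List.foldl_flatten]

theorem fewest_bag_spec : Claim_equal_fewest_bag := by
  intro trial_list _
  show fewest_bag trial_list = fewest_bag_alt trial_list
  rw [pvA_flat, pvB_flat]
  set ps := trial_list.flatten with hps
  -- A's dict
  set a := ps.foldl pvAStep PySem.Dict.empty with ha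
  -- B's groups dict
  set g := ps.foldl (fun g p => g.modify p.1 [] (fun vs => vs ++ [p.2])) PySem.Dict.empty with hg
  have hgkeys : g.keys = PySem.Set.ofList (ps.map (fun p => p.1)) := by
    rw [hg, PySem.Dict.keys_foldl_modify_key ps (fun p => p.1) [] (fun _ p vs => vs ++ [p.2])]
    rw [PySem.Dict.keys_empty, PySem.Set.update_nil_left]
  have hakeys : a.keys = PySem.Set.ofList (ps.map (fun p => p.1)) := by
    rw [ha, pvFoldA_keys, PySem.Dict.keys_empty, PySem.Set.update_nil_left]
  have hand : a.keys.Nodup := by rw [hakeys]; exact PySem.Set.nodup_ofList _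
  have hgnd : g.keys.Nodup := by rw [hgkeys]; exact PySem.Set.nodup_ofList _
  have hgget : ∀ c, g.getD c [] = (ps.filter (fun p => p.1 == c)).map (fun p => p.2) := by
    intro c
    rw [hg, PySem.Dict.getD_foldl_modify_append ps PySem.Dict.empty c]
    simp [PySem.Dict.getD_empty]
  rw [PySem.Dict.items_eq_map_keys a hand 0, PySem.Dict.items_eq_map_keys g hgnd [],
      hakeys, hgkeys, List.map_map]
  apply List.map_congr_left
  intro c _
  simp only [Function.comp_apply]
  congr 1
  rw [hgget c, pvMax?_eq_foldl, PySem.Dict.getD_eq_get?_getD, ha, pvFoldA_get?,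
      PySem.Dict.get?_empty]
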